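-- pv_equiv track=rewrite | github.com/neo154/hackerrank-solutions | Python/MaximizeIt/maximize_it.py | eval_entries
-- ===== SOURCE A (Python) =====
-- def eval_entries(entries, mod, running_count=0):
--     entry=entries[0]
--     if len(entries)==1:
--         return max([
--             (running_count+x**2)%mod for x in entry
--         ])
--     return max([
--         eval_entries(entries[1:], mod, running_count+x**2) for x in entry
--     ])
-- ===== SOURCE B (Python) =====
-- def eval_entries(entries, mod, running_count=0):
--     residues = {running_count % mod}
--     for entry in entries:
--         residues = {(r + x * x) % mod for r in residues for x in entry}
--     return max(residues)
-- ===== Notes on version B (the rewrite author's own statement) =====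
-- stated objective: faster
-- what changed: Replaces A's recursion over every one-element-per-list choice (exponential in the number of lists) by a dynamic program over the set of achievable residues mod m, combined list by list.
import Mathlib
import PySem

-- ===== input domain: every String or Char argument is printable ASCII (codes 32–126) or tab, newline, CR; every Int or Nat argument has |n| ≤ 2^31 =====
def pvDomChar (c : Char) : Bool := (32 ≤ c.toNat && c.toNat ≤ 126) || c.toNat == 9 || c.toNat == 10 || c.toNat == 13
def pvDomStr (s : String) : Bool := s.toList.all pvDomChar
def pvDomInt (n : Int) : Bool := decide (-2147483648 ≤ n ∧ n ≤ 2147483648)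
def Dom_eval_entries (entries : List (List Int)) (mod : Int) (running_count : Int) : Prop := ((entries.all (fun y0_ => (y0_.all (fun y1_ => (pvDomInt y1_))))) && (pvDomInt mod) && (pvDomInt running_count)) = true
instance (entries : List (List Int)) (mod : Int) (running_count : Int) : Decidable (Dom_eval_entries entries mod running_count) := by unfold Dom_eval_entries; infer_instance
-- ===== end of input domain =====

-- B replaces A's recursion over every one-element-per-list choice by a DP over the set of
-- achievable residues mod `mod`, combined list by list (objective: faster).

-- ===== PORT A =====
-- literal port of A: entry = entries[0]; if len(entries)==1 return max of the leaf values;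
-- else recurse on entries[1:] for each x in entry.  The [] case is Python's IndexError (excluded by Pre_);
-- an empty inner list makes Python's max raise ValueError (max? = none; excluded by Pre_), getD 0 is never read there.
def eval_entries (entries : List (List Int)) (mod : Int) (running_count : Int) : Int :=
  match entries with
  | [] => 0
  | entry :: rest =>
    if rest = [] then
      (PySem.List.max? (entry.map (fun x => PySem.Int.mod (running_count + x ^ 2) mod)) (fun y => y)).getD 0
    else
      (PySem.List.max? (entry.map (fun x => eval_entries rest mod (running_count + x ^ 2))) (fun y => y)).getD 0

-- ===== PORT B =====
-- literal port of Source B: residues = {running_count % mod}; for each entry replace the set by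
-- {(r + x*x) % mod for r in residues for x in entry}; return max(residues).
-- (max over a set, and the set built from a set, do not depend on the set's iteration order.)
def eval_entries_alt (entries : List (List Int)) (mod : Int) (running_count : Int) : Int :=
  let init : PySem.Set Int := PySem.Set.ofList [PySem.Int.mod running_count mod]
  let final : PySem.Set Int := entries.foldl
    (fun s entry => PySem.Set.ofList (s.flatMap (fun r => entry.map (fun x => PySem.Int.mod (r + x * x) mod)))) init
  (PySem.List.max? final (fun y => y)).getD 0

-- ===== PRECONDITION & SPEC =====
-- Pre_ excludes exactly the inputs where Python A raises: empty `entries` (IndexError on entries[0]),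
-- an empty inner list (ValueError from max([])), and mod = 0 (ZeroDivisionError).
def Pre_eval_entries (entries : List (List Int)) (mod : Int) (running_count : Int) : Prop :=
  entries ≠ [] ∧ (∀ e ∈ entries, e ≠ []) ∧ mod ≠ 0
instance (entries : List (List Int)) (mod : Int) (running_count : Int) : Decidable (Pre_eval_entries entries mod running_count) := by unfold Pre_eval_entries; infer_instance
def pvWitness_eval_entries : List (List Int) × Int × Int := ([[1, 2], [3]], 5, 0)

def Spec_eval_entries (entries : List (List Int)) (mod : Int) (running_count : Int) (out : Int) : Prop := out = eval_entries_alt entries mod running_count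
instance (entries : List (List Int)) (mod : Int) (running_count : Int) (out : Int) : Decidable (Spec_eval_entries entries mod running_count out) := by unfold Spec_eval_entries; infer_instance

-- ===== CLAIM (what is proved, stated in full; the proofs are below) =====
def Claim_equal_eval_entries : Prop := ∀ (entries : List (List Int)) (mod : Int) (running_count : Int), Dom_eval_entries entries mod running_count → Pre_eval_entries entries mod running_count → Spec_eval_entries entries mod running_count (eval_entries entries mod running_count)

-- ===== LEMMAS AND PROOFS =====

-- adding to a value already reduced mod m gives the same residue as adding to the original
theorem pv_mod_add_mod (r a m : Int) :
    PySem.Int.mod (PySem.Int.mod r m + a) m = PySem.Int.mod (r + a) m := by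
  show Int.fmod (Int.fmod r m + a) m = Int.fmod (r + a) m
  rw [Int.fmod_def r m]
  have h : r - m * r.fdiv m + a = (r + a) + (-(r.fdiv m)) * m := by ring
  rw [h, Int.add_mul_fmod_self_right]

theorem pv_mod_idem (r m : Int) :
    PySem.Int.mod (PySem.Int.mod r m) m = PySem.Int.mod r m := by
  have := pv_mod_add_mod r 0 m
  simpa using this

-- the multiset of final values A's recursion ranges over: one per full choice of x's
def pvVals (m : Int) : List (List Int) → Int → List Int
  | [], r => [PySem.Int.mod r m]
  | e :: rest, r => e.flatMap (fun x => pvVals m rest (r + x * x))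

theorem pvVals_ne_nil (m : Int) (entries : List (List Int)) (r : Int)
    (h : ∀ e ∈ entries, e ≠ []) : pvVals m entries r ≠ [] := by
  induction entries generalizing r with
  | nil => simp [pvVals]
  | cons e rest ih =>
    have he : e ≠ [] := h e (by simp)
    simp only [pvVals, ne_eq, List.flatMap_eq_nil_iff, not_forall]
    obtain ⟨x, hx⟩ := List.exists_mem_of_ne_nil e he
    exact ⟨x, hx, ih (r + x * x) (fun e' he' => h e' (by simp [he']))⟩

theorem pvVals_congr (m : Int) (entries : List (List Int)) (r r' : Int)
    (h : PySem.Int.mod r m = PySem.Int.mod r' m) : pvVals m entries r = pvVals m entries r' := by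
  induction entries generalizing r r' with
  | nil => simp [pvVals, h]
  | cons e rest ih =>
    simp only [pvVals]
    have hf : (fun x => pvVals m rest (r + x * x)) = (fun x => pvVals m rest (r' + x * x)) := by
      funext x
      exact ih (r + x * x) (r' + x * x) (by rw [← pv_mod_add_mod r, h, pv_mod_add_mod])
    rw [hf]

-- same members + nonempty ⇒ same max
theorem pv_max_mem_eq (l1 l2 : List Int) (h1 : l1 ≠ []) (h2 : l2 ≠ [])
    (h : ∀ y, y ∈ l1 ↔ y ∈ l2) :
    (PySem.List.max? l1 (fun y => y)).getD 0 = (PySem.List.max? l2 (fun y => y)).getD 0 := by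
  cases hm1 : PySem.List.max? l1 (fun y => y) with
  | none => exact absurd ((PySem.List.max?_eq_none_iff _ _).mp hm1) h1
  | some a =>
    cases hm2 : PySem.List.max? l2 (fun y => y) with
    | none => exact absurd ((PySem.List.max?_eq_none_iff _ _).mp hm2) h2
    | some b =>
      have ha : a ∈ l1 := PySem.List.max?_mem hm1
      have hb : b ∈ l2 := PySem.List.max?_mem hm2
      have hab : a ≤ b := PySem.List.max?_isMax hm2 a ((h a).mp ha)
      have hba : b ≤ a := PySem.List.max?_isMax hm1 b ((h b).mpr hb)
      simp [le_antisymm hab hba]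

-- generic: the max over the per-x maxima equals the max over the flattened list
theorem pv_max_flat (e : List Int) (g : Int → List Int) (he : e ≠ [])
    (hg : ∀ x ∈ e, g x ≠ []) :
    (PySem.List.max? (e.map (fun x => (PySem.List.max? (g x) (fun y => y)).getD 0)) (fun y => y)).getD 0
      = (PySem.List.max? (e.flatMap g) (fun y => y)).getD 0 := by
  cases hm1 : PySem.List.max? (e.map (fun x => (PySem.List.max? (g x) (fun y => y)).getD 0)) (fun y => y) with
  | none =>
    exact absurd ((PySem.List.max?_eq_none_iff _ _).mp hm1) (by simpa using he)
  | some a =>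
    cases hm2 : PySem.List.max? (e.flatMap g) (fun y => y) with
    | none =>
      have hnil : e.flatMap g = [] := (PySem.List.max?_eq_none_iff _ _).mp hm2
      obtain ⟨x, hx⟩ := List.exists_mem_of_ne_nil e he
      rw [List.flatMap_eq_nil_iff] at hnil
      exact absurd (hnil _ hx) (hg x hx)
    | some b =>
      have ha : a ∈ e.map (fun x => (PySem.List.max? (g x) (fun y => y)).getD 0) := PySem.List.max?_mem hm1
      obtain ⟨x0, hx0, ha0⟩ := List.mem_map.mp ha
      have hab : a ≤ b := by
        cases hmg : PySem.List.max? (g x0) (fun y => y) with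
        | none => exact absurd ((PySem.List.max?_eq_none_iff _ _).mp hmg) (hg x0 hx0)
        | some c =>
          have hc : c ∈ g x0 := PySem.List.max?_mem hmg
          have hcmem : c ∈ e.flatMap g := List.mem_flatMap.mpr ⟨x0, hx0, hc⟩
          have hcb : c ≤ b := PySem.List.max?_isMax hm2 c hcmem
          rw [← ha0, hmg]
          simpa using hcb
      have hb : b ∈ e.flatMap g := PySem.List.max?_mem hm2
      obtain ⟨x1, hx1, hb1⟩ := List.mem_flatMap.mp hb
      have hba : b ≤ a := by
        cases hmg : PySem.List.max? (g x1) (fun y => y) with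
        | none => exact absurd ((PySem.List.max?_eq_none_iff _ _).mp hmg) (hg x1 hx1)
        | some c =>
          have hbc : b ≤ c := PySem.List.max?_isMax hmg b hb1
          have hmem : (PySem.List.max? (g x1) (fun y => y)).getD 0
              ∈ e.map (fun x => (PySem.List.max? (g x) (fun y => y)).getD 0) :=
            List.mem_map.mpr ⟨x1, hx1, rfl⟩
          have hca : (PySem.List.max? (g x1) (fun y => y)).getD 0 ≤ a := PySem.List.max?_isMax hm1 _ hmem
          rw [hmg] at hca
          simp at hca
          omega
      simp [le_antisymm hab hba]

-- A computes the max of pvVals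
theorem pv_A_char (m : Int) (entries : List (List Int)) (r : Int)
    (hne : entries ≠ []) (h : ∀ e ∈ entries, e ≠ []) :
    eval_entries entries m r = (PySem.List.max? (pvVals m entries r) (fun y => y)).getD 0 := by
  induction entries generalizing r with
  | nil => exact absurd rfl hne
  | cons entry rest ih =>
    by_cases hr : rest = []
    · subst hr
      simp only [eval_entries, pvVals, if_true]
      rw [← List.map_eq_flatMap]
      congr 2
      apply List.map_congr_left
      intro x _
      ring_nf
    · simp only [eval_entries, if_neg hr]
      have hent : entry ≠ [] := h entry (by simp)
      have hrest : ∀ e ∈ rest, e ≠ [] := fun e he => h e (by simp [he])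
      have hmf := pv_max_flat entry (fun x => pvVals m rest (r + x * x)) hent
        (fun x _ => pvVals_ne_nil m rest _ hrest)
      have hfun : (fun x => eval_entries rest m (r + x ^ 2))
          = (fun x => (PySem.List.max? (pvVals m rest (r + x * x)) (fun y => y)).getD 0) := by
        funext x
        rw [show r + x ^ 2 = r + x * x by ring]
        exact ih (r + x * x) hr hrest
      rw [hfun, hmf]
      rfl

-- B's residue set after the fold contains exactly the members of pvVals (from a reduced start set)
theorem pv_B_mem (m : Int) (entries : List (List Int)) (S : List Int)
    (hS : ∀ r ∈ S, PySem.Int.mod r m = r) (y : Int) :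
    (y ∈ entries.foldl
      (fun s entry => PySem.Set.ofList (s.flatMap (fun r => entry.map (fun x => PySem.Int.mod (r + x * x) m)))) S)
    ↔ ∃ r ∈ S, y ∈ pvVals m entries r := by
  induction entries generalizing S with
  | nil =>
    simp only [List.foldl_nil, pvVals, List.mem_singleton]
    constructor
    · intro hy
      exact ⟨y, hy, (hS y hy).symm⟩
    · rintro ⟨r, hr, rfl⟩
      rw [hS r hr]
      exact hr
  | cons e rest ih =>
    simp only [List.foldl_cons]
    have hS' : ∀ r' ∈ PySem.Set.ofList (S.flatMap (fun r => e.map (fun x => PySem.Int.mod (r + x * x) m))),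
        PySem.Int.mod r' m = r' := by
      intro r' hr'
      rw [PySem.Set.mem_ofList] at hr'
      obtain ⟨r, _, hr'2⟩ := List.mem_flatMap.mp hr'
      obtain ⟨x, _, rfl⟩ := List.mem_map.mp hr'2
      exact pv_mod_idem _ m
    rw [ih _ hS']
    constructor
    · rintro ⟨r', hr', hy⟩
      rw [PySem.Set.mem_ofList] at hr'
      obtain ⟨r, hrS, hr'2⟩ := List.mem_flatMap.mp hr'
      obtain ⟨x, hx, rfl⟩ := List.mem_map.mp hr'2
      refine ⟨r, hrS, ?_⟩
      simp only [pvVals]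
      refine List.mem_flatMap.mpr ⟨x, hx, ?_⟩
      rwa [pvVals_congr m rest _ (r + x * x) (pv_mod_idem _ m)] at hy
    · rintro ⟨r, hrS, hy⟩
      simp only [pvVals] at hy
      obtain ⟨x, hx, hy2⟩ := List.mem_flatMap.mp hy
      refine ⟨PySem.Int.mod (r + x * x) m, ?_, ?_⟩
      · rw [PySem.Set.mem_ofList]
        exact List.mem_flatMap.mpr ⟨r, hrS, List.mem_map.mpr ⟨x, hx, rfl⟩⟩
      · rwa [pvVals_congr m rest _ (r + x * x) (pv_mod_idem _ m)]

-- ===== VERDICT (by name: the statement is the Claim_ definition above) =====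
theorem eval_entries_spec : Claim_equal_eval_entries := by
  intro entries m rc _ hpre
  obtain ⟨hne, hinner, -⟩ := hpre
  show eval_entries entries m rc = eval_entries_alt entries m rc
  simp only [eval_entries_alt]
  rw [pv_A_char m entries rc hne hinner]
  have hmem : ∀ y, (y ∈ entries.foldl
      (fun s entry => PySem.Set.ofList (s.flatMap (fun r => entry.map (fun x => PySem.Int.mod (r + x * x) m))))
      (PySem.Set.ofList [PySem.Int.mod rc m]))
      ↔ y ∈ pvVals m entries rc := by
    intro y
    rw [pv_B_mem m entries _
      (by intro r hr; simp [PySem.Set.ofList, PySem.Set.add] at hr; rw [hr]; exact pv_mod_idem rc m) y]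
    constructor
    · rintro ⟨r, hr, hy⟩
      simp [PySem.Set.ofList, PySem.Set.add] at hr
      rwa [hr, pvVals_congr m entries _ rc (pv_mod_idem rc m)] at hy
    · intro hy
      refine ⟨PySem.Int.mod rc m, by simp [PySem.Set.ofList, PySem.Set.add], ?_⟩
      rwa [pvVals_congr m entries _ rc (pv_mod_idem rc m)]
  have hvne : pvVals m entries rc ≠ [] := pvVals_ne_nil m entries rc hinner
  obtain ⟨v, hv⟩ := List.exists_mem_of_ne_nil _ hvne
  apply pv_max_mem_eq _ _ hvne
  · intro hnil
    have hvmem := (hmem v).mpr hv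
    rw [hnil] at hvmem
    exact absurd hvmem (List.not_mem_nil)
  · intro y
    exact (hmem y).symm
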